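-- pv_equiv track=rewrite | github.com/lustresixx/PAMT | pamt/extractors/preference_models.py | _token_spans
-- ===== SOURCE A (Python) =====
-- from typing import Any, Callable, Dict, Iterable, List, Optional, Tuple
--
-- def _token_spans(text: str) -> List[Tuple[int, int, str]]:
--     spans: List[Tuple[int, int, str]] = []
--     offset = 0
--     for token in text.split():
--         start = text.find(token, offset)
--         if start == -1:
--             continue
--         end = start + len(token)
--         spans.append((start, end, token))
--         offset = end
--     return spans
-- ===== SOURCE B (Python) =====
-- from typing import List, Tuple
--
-- def _token_spans(text: str) -> List[Tuple[int, int, str]]: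
--     # Single forward pass over the characters: track the start of the current
--     # token instead of splitting first and re-finding each token.
--     spans: List[Tuple[int, int, str]] = []
--     start = None
--     for i, ch in enumerate(text):
--         if ch.isspace():
--             if start is not None:
--                 spans.append((start, i, text[start:i]))
--                 start = None
--         elif start is None:
--             start = i
--     if start is not None:
--         spans.append((start, len(text), text[start:]))
--     return spans
-- ===== Notes on version B (the rewrite author's own statement) =====
-- stated objective: alternative
-- what changed: Replaces the two-phase split()-then-find(offset) scan with a single forward pass over the characters that tracks the start index of the current token and flushes it on whitespace (and once at the end).
import Mathlib
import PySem

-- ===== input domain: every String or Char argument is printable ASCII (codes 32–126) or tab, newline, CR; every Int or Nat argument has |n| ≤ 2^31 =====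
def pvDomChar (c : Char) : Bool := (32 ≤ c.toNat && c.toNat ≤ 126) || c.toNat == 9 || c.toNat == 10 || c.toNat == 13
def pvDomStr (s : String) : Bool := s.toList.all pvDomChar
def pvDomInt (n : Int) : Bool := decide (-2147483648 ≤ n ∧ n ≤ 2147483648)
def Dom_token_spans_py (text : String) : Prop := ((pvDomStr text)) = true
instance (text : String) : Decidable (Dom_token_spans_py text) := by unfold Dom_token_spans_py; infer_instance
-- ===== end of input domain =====

-- B replaces A's split()-then-find(offset) two-phase scan by a single forward pass
-- tracking the start of the current token (alternative decomposition, same cost).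


-- ===== PORT A =====
-- one loop iteration of A: start = text.find(token, offset); skip if -1; else append span
def pvAStep (text : String) (st : List (Int × Int × String) × Int) (token : String) :
    List (Int × Int × String) × Int :=
  let start := PySem.Str.findFrom text token st.2
  if start = -1 then st
  else
    let e := start + PySem.Str.len token
    (st.1 ++ [(start, e, token)], e)

def token_spans_py (text : String) : List (Int × Int × String) :=
  ((PySem.Str.split₀ text).foldl (pvAStep text) ([], 0)).1

-- ===== PORT B =====
-- one loop iteration of B: close the open token on whitespace, open one on a non-space
def pvBStep (text : String) (st : List (Int × Int × String) × Option Int) (p : Int × Char) :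
    List (Int × Int × String) × Option Int :=
  if PySem.Str.isspace p.2 then
    match st.2 with
    | some s => (st.1 ++ [(s, p.1, PySem.Str.slice text (some s) (some p.1))], none)
    | none => st
  else
    match st.2 with
    | some _ => st
    | none => (st.1, some p.1)

-- the flush after the loop: an open token runs to the end of the text
def pvBFinish (text : String) (st : List (Int × Int × String) × Option Int) :
    List (Int × Int × String) :=
  match st.2 with
  | some s => st.1 ++ [(s, PySem.Str.len text, PySem.Str.slice text (some s) none)]
  | none => st.1

def token_spans_py_alt (text : String) : List (Int × Int × String) :=
  pvBFinish text ((PySem.List.enumerate text.toList).foldl (pvBStep text) ([], none))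

-- ===== PRECONDITION & SPEC =====
def Spec_token_spans_py (text : String) (out : List (Int × Int × String)) : Prop := out = token_spans_py_alt text
instance (text : String) (out : List (Int × Int × String)) : Decidable (Spec_token_spans_py text out) := by unfold Spec_token_spans_py; infer_instance

-- ===== CLAIM (what is proved, stated in full; the proofs are below) =====
def Claim_equal_token_spans_py : Prop := ∀ (text : String), Dom_token_spans_py text → Spec_token_spans_py text (token_spans_py text)

-- ===== LEMMAS AND PROOFS =====

-- canonical token spans of the suffix of the text starting at absolute index i
def pvSpans : List Char → Nat → List (Int × Int × String)
  | [], _ => []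
  | c :: rest, i =>
    if PySem.Chars.isspace c then pvSpans rest (i + 1)
    else
      let tok := (c :: rest).takeWhile (fun d => !PySem.Chars.isspace d)
      (((i : Nat) : Int), (((i + tok.length : Nat)) : Int), String.ofList tok) ::
        pvSpans ((c :: rest).dropWhile (fun d => !PySem.Chars.isspace d)) (i + tok.length)
  termination_by cs _ => cs.length
  decreasing_by
    · simp
    · rw [List.dropWhile_cons_of_pos (by simp [*])]
      have := List.length_dropWhile_le (fun d => !PySem.Chars.isspace d) rest
      simp only [List.length_cons]; omega

-- split₀.go ignores its accumulator up to prepending its reverse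
theorem pv_go_acc (cs : List Char) : ∀ (cur : List Char) (acc : List (List Char)),
    PySem.Chars.split₀.go cs cur acc = acc.reverse ++ PySem.Chars.split₀.go cs cur [] := by
  induction cs with
  | nil =>
    intro cur acc
    simp only [PySem.Chars.split₀.go]
    by_cases h : cur.isEmpty <;> simp [h]
  | cons c rest ih =>
    intro cur acc
    simp only [PySem.Chars.split₀.go]
    by_cases hs : PySem.Chars.isspace c
    · by_cases h : cur.isEmpty <;> simp only [hs, h, if_true, if_false, Bool.false_eq_true]
      · exact ih [] acc
      · rw [ih [] (cur.reverse :: acc), ih [] [cur.reverse]]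
        simp
    · simp only [hs, Bool.false_eq_true, if_false]
      exact ih (c :: cur) acc

theorem pv_split₀_space (c : Char) (rest : List Char) (h : PySem.Chars.isspace c = true) :
    PySem.Chars.split₀ (c :: rest) = PySem.Chars.split₀ rest := by
  simp [PySem.Chars.split₀, PySem.Chars.split₀.go, h]

-- running split₀.go with a nonempty current token emits that token extended by the
-- leading non-space run, then splits the remainder
theorem pv_go_mid (cs : List Char) : ∀ (cur : List Char), cur ≠ [] →
    PySem.Chars.split₀.go cs cur [] =
      (cur.reverse ++ cs.takeWhile (fun d => !PySem.Chars.isspace d)) ::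
        PySem.Chars.split₀ (cs.dropWhile (fun d => !PySem.Chars.isspace d)) := by
  induction cs with
  | nil =>
    intro cur hcur
    simp [PySem.Chars.split₀.go, PySem.Chars.split₀, List.isEmpty_iff, hcur]
  | cons c rest ih =>
    intro cur hcur
    by_cases hs : PySem.Chars.isspace c
    · have h1 : PySem.Chars.split₀.go (c :: rest) cur [] = PySem.Chars.split₀.go rest [] [cur.reverse] := by
        simp [PySem.Chars.split₀.go, hs, List.isEmpty_iff, hcur]
      rw [h1, pv_go_acc]
      have h2 : PySem.Chars.split₀.go rest [] [] = PySem.Chars.split₀ rest := rfl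
      rw [h2]
      simp only [List.takeWhile_cons, List.dropWhile_cons, hs, Bool.not_true, Bool.false_eq_true, if_false]
      rw [pv_split₀_space c rest hs]
      simp
    · have h1 : PySem.Chars.split₀.go (c :: rest) cur [] = PySem.Chars.split₀.go rest (c :: cur) [] := by
        simp [PySem.Chars.split₀.go, hs]
      rw [h1, ih (c :: cur) (by simp)]
      simp [hs]

theorem pv_split₀_tok (c : Char) (rest : List Char) (h : PySem.Chars.isspace c = false) :
    PySem.Chars.split₀ (c :: rest) =
      ((c :: rest).takeWhile (fun d => !PySem.Chars.isspace d)) ::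
        PySem.Chars.split₀ ((c :: rest).dropWhile (fun d => !PySem.Chars.isspace d)) := by
  have h1 : PySem.Chars.split₀ (c :: rest) = PySem.Chars.split₀.go rest [c] [] := by
    simp [PySem.Chars.split₀, PySem.Chars.split₀.go, h]
  rw [h1, pv_go_mid rest [c] (by simp)]
  simp [h]

-- unfolding lemmas for pvSpans
theorem pvSpans_nil (i : Nat) : pvSpans [] i = [] := by simp [pvSpans]

theorem pvSpans_space (c : Char) (rest : List Char) (i : Nat)
    (h : PySem.Chars.isspace c = true) : pvSpans (c :: rest) i = pvSpans rest (i + 1) := by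
  rw [pvSpans]; simp [h]

theorem pvSpans_tok (c : Char) (rest : List Char) (i : Nat)
    (h : PySem.Chars.isspace c = false) :
    pvSpans (c :: rest) i =
      ((i : Int), ((i + ((c :: rest).takeWhile (fun d => !PySem.Chars.isspace d)).length : Nat) : Int),
        String.ofList ((c :: rest).takeWhile (fun d => !PySem.Chars.isspace d))) ::
        pvSpans ((c :: rest).dropWhile (fun d => !PySem.Chars.isspace d))
          (i + ((c :: rest).takeWhile (fun d => !PySem.Chars.isspace d)).length) := by
  rw [pvSpans]; simp [h]

theorem pvSpans_all_nonspace (mid : List Char) (i : Nat) (hne : mid ≠ [])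
    (hmid : ∀ x ∈ mid, PySem.Chars.isspace x = false) :
    pvSpans mid i = [((i : Int), ((i + mid.length : Nat) : Int), String.ofList mid)] := by
  obtain ⟨c, rest, rfl⟩ := List.exists_cons_of_ne_nil hne
  have hc : PySem.Chars.isspace c = false := hmid c (by simp)
  have htw : (c :: rest).takeWhile (fun d => !PySem.Chars.isspace d) = c :: rest :=
    List.takeWhile_eq_self_iff.2 (by intro x hx; simp [hmid x hx])
  have hdw : (c :: rest).dropWhile (fun d => !PySem.Chars.isspace d) = [] :=
    List.dropWhile_eq_nil_iff.2 (by intro x hx; simp [hmid x hx])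
  rw [pvSpans_tok c rest i hc, htw, hdw, pvSpans]

theorem pvSpans_mid (mid : List Char) (c : Char) (rest' : List Char) (i : Nat)
    (hne : mid ≠ []) (hmid : ∀ x ∈ mid, PySem.Chars.isspace x = false)
    (hc : PySem.Chars.isspace c = true) :
    pvSpans (mid ++ c :: rest') i =
      ((i : Int), ((i + mid.length : Nat) : Int), String.ofList mid) ::
        pvSpans rest' (i + mid.length + 1) := by
  obtain ⟨m, mid', rfl⟩ := List.exists_cons_of_ne_nil hne
  have hm : PySem.Chars.isspace m = false := hmid m (by simp)
  have htwm : (m :: mid').takeWhile (fun d => !PySem.Chars.isspace d) = m :: mid' :=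
    List.takeWhile_eq_self_iff.2 (by intro x hx; simp [hmid x hx])
  have hdwm : (m :: mid').dropWhile (fun d => !PySem.Chars.isspace d) = [] :=
    List.dropWhile_eq_nil_iff.2 (by intro x hx; simp [hmid x hx])
  have htw : ((m :: mid') ++ c :: rest').takeWhile (fun d => !PySem.Chars.isspace d) = m :: mid' := by
    rw [List.takeWhile_append]
    simp [htwm, hc]
  have hdw : ((m :: mid') ++ c :: rest').dropWhile (fun d => !PySem.Chars.isspace d) = c :: rest' := by
    rw [List.dropWhile_append]
    simp [hdwm, hc]
  rw [List.cons_append, pvSpans_tok m (mid' ++ c :: rest') i hm, ← List.cons_append, htw, hdw,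
    pvSpans_space c rest' _ hc]

-- text.find(tok, off) returns exactly the true position k of the token when the
-- characters in [off, k) are whitespace and the token starts with a non-space char
theorem pv_findFrom_eq (l : List Char) (c : Char) (tok' : List Char) (off k : Nat)
    (hoff : off ≤ k) (hk : k ≤ l.length)
    (hpre : (c :: tok') <+: l.drop k) (hc : PySem.Chars.isspace c = false)
    (hws : ∀ j (hj : j < l.length), off ≤ j → j < k → PySem.Chars.isspace l[j] = true) :
    PySem.Chars.findFrom l (c :: tok') (off : Int) = (k : Int) := by
  rw [PySem.Chars.findFrom_natCast l (c :: tok') off (le_trans hoff hk)]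
  have hocc : (c :: tok') <+: (l.drop off).drop (k - off) := by
    rwa [List.drop_drop, Nat.add_sub_cancel' hoff]
  have hisin : PySem.Chars.isIn (c :: tok') (l.drop off) = true :=
    (PySem.Chars.exists_prefix_drop_iff_isIn _ _).1 ⟨k - off, hocc⟩
  have hne : PySem.Chars.find (l.drop off) (c :: tok') ≠ -1 :=
    (PySem.Chars.find_ne_neg_one_iff _ _).2 ((PySem.Chars.isIn_iff_infix _ _).1 hisin)
  have hnn : 0 ≤ PySem.Chars.find (l.drop off) (c :: tok') := by
    have := PySem.Chars.neg_one_le_find (l.drop off) (c :: tok')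
    omega
  obtain ⟨hpre2, hmin⟩ := PySem.Chars.find_spec (s := l.drop off) (sub := c :: tok') hnn
  set r := (PySem.Chars.find (l.drop off) (c :: tok')).toNat with hr
  have hrle : r ≤ k - off := by
    by_contra hlt
    exact hmin (k - off) (by omega) hocc
  have hreq : r = k - off := by
    by_contra hne2
    have hrlt : r < k - off := by omega
    have hj : off + r < k := by omega
    have hjlen : off + r < l.length := by omega
    have hdrop2 : (l.drop off).drop r = l.drop (off + r) := by rw [List.drop_drop]
    rw [hdrop2] at hpre2
    have hcons : l.drop (off + r) = l[off + r] :: l.drop (off + r + 1) :=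
      List.drop_eq_getElem_cons hjlen
    rw [hcons] at hpre2
    have hhd : c = l[off + r] := (List.cons_prefix_cons.1 hpre2).1
    have := hws (off + r) hjlen (by omega) hj
    rw [← hhd] at this
    simp [hc] at this
  have hfi : PySem.Chars.find (l.drop off) (c :: tok') = ((k - off : Nat) : Int) := by omega
  rw [hfi]
  simp only [if_neg (by omega : ¬ ((k - off : Nat) : Int) = -1)]
  omega

-- loop invariant of A's fold over the remaining tokens
theorem pvA_inv (text : String) (n : Nat) : ∀ (rest : List Char), rest.length ≤ n →
    ∀ (k off : Nat) (spans : List (Int × Int × String)),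
    rest = text.toList.drop k → k ≤ text.toList.length → off ≤ k →
    (∀ j (hj : j < text.toList.length), off ≤ j → j < k →
      PySem.Chars.isspace text.toList[j] = true) →
    (((PySem.Chars.split₀ rest).map String.ofList).foldl (pvAStep text) (spans, (off : Int))).1
      = spans ++ pvSpans rest k := by
  induction n with
  | zero =>
    intro rest hlen k off spans hrest hk hoff hws
    have h0 : rest = [] := List.eq_nil_of_length_eq_zero (by omega)
    subst h0
    simp [PySem.Chars.split₀, PySem.Chars.split₀.go, pvSpans_nil]
  | succ n ih =>
    intro rest hlen k off spans hrest hk hoff hws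
    match rest, hrest with
    | [], hrest => simp [PySem.Chars.split₀, PySem.Chars.split₀.go, pvSpans_nil]
    | c :: rest', hrest =>
      have hklt : k < text.toList.length := by
        have := congrArg List.length hrest
        simp only [List.length_cons, List.length_drop] at this
        omega
      have hcons : text.toList.drop k = text.toList[k] :: text.toList.drop (k + 1) :=
        List.drop_eq_getElem_cons hklt
      have hpair := List.cons.inj (hrest.trans hcons)
      have hck : text.toList[k] = c := hpair.1.symm
      by_cases hs : PySem.Chars.isspace c = true
      · -- c is whitespace: A's split drops it, the canonical spans skip it
        rw [pv_split₀_space c rest' hs]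
        rw [ih rest' (by simp at hlen; omega) (k + 1) off spans hpair.2 (by omega) (by omega)
          (by
            intro j hj h1 h2
            rcases Nat.lt_or_ge j k with h3 | h3
            · exact hws j hj h1 h3
            · have : j = k := by omega
              subst this; rw [hck]; exact hs)]
        rw [pvSpans_space c rest' k hs]
      · have hs' : PySem.Chars.isspace c = false := by simpa using hs
        rw [pv_split₀_tok c rest' hs']
        set tw := (c :: rest').takeWhile (fun d => !PySem.Chars.isspace d) with htw
        set dw := (c :: rest').dropWhile (fun d => !PySem.Chars.isspace d) with hdw
        have htwc : tw = c :: rest'.takeWhile (fun d => !PySem.Chars.isspace d) := by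
          rw [htw, List.takeWhile_cons_of_pos (by simp [hs'])]
        have hdwc : dw = rest'.dropWhile (fun d => !PySem.Chars.isspace d) := by
          rw [hdw, List.dropWhile_cons_of_pos (by simp [hs'])]
        have hpre : tw <+: text.toList.drop k := by rw [← hrest]; exact List.takeWhile_prefix _
        have hfind : PySem.Chars.findFrom text.toList tw (off : Int) = (k : Int) := by
          rw [htwc]
          exact pv_findFrom_eq text.toList c _ off k hoff (le_of_lt hklt)
            (htwc ▸ hpre) hs' hws
        have htwlen : tw.length ≤ text.toList.length - k := by
          have := hpre.length_le
          simpa [List.length_drop] using this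
        have hdwdrop : dw = text.toList.drop (k + tw.length) := by
          have h1 : tw ++ dw = c :: rest' := List.takeWhile_append_dropWhile
          have h2 : dw = (c :: rest').drop tw.length := by
            rw [← h1, List.drop_left]
          rw [h2, hrest, List.drop_drop, Nat.add_comm]
        -- one step of the fold
        simp only [List.map_cons, List.foldl_cons]
        have hstep : pvAStep text (spans, (off : Int)) (String.ofList tw) =
            (spans ++ [((k : Int), ((k + tw.length : Nat) : Int), String.ofList tw)],
              ((k + tw.length : Nat) : Int)) := by
          simp only [pvAStep, PySem.Str.findFrom]
          rw [String.toList_ofList, hfind]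
          simp only [if_neg (by omega : ¬ (k : Int) = -1), PySem.Str.len,
            String.toList_ofList]
          constructor
        rw [hstep]
        rw [ih dw (by
              rw [hdwc]
              have := List.length_dropWhile_le (fun d => !PySem.Chars.isspace d) rest'
              simp only [List.length_cons] at hlen
              omega)
            (k + tw.length) (k + tw.length) _ hdwdrop (by omega) (le_refl _)
            (by intro j hj h1 h2; omega)]
        rw [pvSpans_tok c rest' k hs', ← htw, ← hdw]
        simp

-- the two possible results of B's pass, by the state of the open token
def pvBRhs (text : String) : Option Nat → List Char → Nat → List (Int × Int × String)
  | none, rest, k => pvSpans rest k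
  | some s, _, _ => pvSpans (text.toList.drop s) s

-- loop invariant of B's single pass (o = start of the currently open token, if any)
theorem pvB_inv (text : String) : ∀ (rest : List Char) (k : Nat)
    (spans : List (Int × Int × String)) (o : Option Nat),
    rest = text.toList.drop k → k ≤ text.toList.length →
    (∀ s, o = some s → s < k ∧ s < text.toList.length ∧
      ∀ d ∈ (text.toList.drop s).take (k - s), PySem.Chars.isspace d = false) →
    pvBFinish text ((PySem.List.enumerate rest (k : Int)).foldl (pvBStep text)
        (spans, Option.map (fun (s : Nat) => (s : Int)) o))
      = spans ++ pvBRhs text o rest k := by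
  intro rest
  induction rest with
  | nil =>
    intro k spans o hrest hk hinv
    have hlenk : text.toList.length ≤ k := by
      have := congrArg List.length hrest
      simp only [List.length_nil, List.length_drop] at this
      omega
    match o with
    | none => simp [PySem.List.enumerate_nil, pvBFinish, pvSpans_nil, pvBRhs]
    | some s =>
      obtain ⟨hsk, hslen, hwin⟩ := hinv s rfl
      have htake : (text.toList.drop s).take (k - s) = text.toList.drop s :=
        List.take_of_length_le (by simp only [List.length_drop]; omega)
      rw [htake] at hwin
      have hdropne : text.toList.drop s ≠ [] := by
        intro h
        have := congrArg List.length h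
        simp only [List.length_drop, List.length_nil] at this
        omega
      simp only [pvBRhs]
      rw [pvSpans_all_nonspace _ s hdropne hwin]
      simp only [PySem.List.enumerate_nil, List.foldl_nil, Option.map_some, pvBFinish]
      have h1 : s + (text.toList.drop s).length = text.toList.length := by
        simp only [List.length_drop]; omega
      have h2 : PySem.Str.len text = ((text.toList.length : Nat) : Int) := rfl
      have h3 : PySem.Str.slice text (some (s : Int)) none = String.ofList (text.toList.drop s) := by
        simp [PySem.Str.slice, PySem.Chars.slice_eq_listSlice, PySem.List.slice_from_natCast]
      rw [h1, h2, h3]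
  | cons c rest' ih =>
    intro k spans o hrest hk hinv
    have hklt : k < text.toList.length := by
      have := congrArg List.length hrest
      simp only [List.length_cons, List.length_drop] at this
      omega
    have hcons : text.toList.drop k = text.toList[k] :: text.toList.drop (k + 1) :=
      List.drop_eq_getElem_cons hklt
    have hpair := List.cons.inj (hrest.trans hcons)
    have hck : text.toList[k] = c := hpair.1.symm
    have hcast : (k : Int) + 1 = ((k + 1 : Nat) : Int) := by push_cast; ring
    rw [PySem.List.enumerate_cons, List.foldl_cons, hcast]
    by_cases hs : PySem.Chars.isspace c = true
    · match o with
      | none =>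
        have hstep : pvBStep text (spans, Option.map (fun (s : Nat) => (s : Int)) none) ((k : Int), c)
            = (spans, Option.map (fun (s : Nat) => (s : Int)) (none : Option Nat)) := by
          simp [pvBStep, show PySem.Str.isspace = PySem.Chars.isspace from rfl, hs]
        rw [hstep, ih (k + 1) spans none hpair.2 (by omega) (by simp)]
        simp only [pvBRhs]
        rw [pvSpans_space c rest' k hs]
      | some s =>
        obtain ⟨hsk, hslen, hwin⟩ := hinv s rfl
        have hstep : pvBStep text (spans, Option.map (fun (s : Nat) => (s : Int)) (some s)) ((k : Int), c)
            = (spans ++ [((s : Int), (k : Int), PySem.Str.slice text (some (s : Int)) (some (k : Int)))],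
                Option.map (fun (s : Nat) => (s : Int)) (none : Option Nat)) := by
          simp [pvBStep, show PySem.Str.isspace = PySem.Chars.isspace from rfl, hs]
        rw [hstep, ih (k + 1) _ none hpair.2 (by omega) (by simp)]
        simp only [pvBRhs]
        -- decompose text.toList.drop s = mid ++ c :: rest'
        have hmideq : (text.toList.drop s).take (k - s) ++ c :: rest' = text.toList.drop s := by
          have hdd : (text.toList.drop s).drop (k - s) = text.toList.drop k := by
            rw [List.drop_drop, Nat.add_sub_cancel' (by omega : s ≤ k)]
          conv_rhs => rw [← List.take_append_drop (k - s) (text.toList.drop s)]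
          rw [hdd, ← hrest]
        have hmidlen : ((text.toList.drop s).take (k - s)).length = k - s := by
          simp only [List.length_take, List.length_drop]; omega
        have hmidne : (text.toList.drop s).take (k - s) ≠ [] := by
          intro h
          rw [h] at hmidlen
          simp at hmidlen
          omega
        rw [← hmideq, pvSpans_mid _ c rest' s hmidne hwin hs, hmidlen]
        have h4 : s + (k - s) = k := by omega
        have h5 : PySem.Str.slice text (some (s : Int)) (some (k : Int))
            = String.ofList ((text.toList.drop s).take (k - s)) := by
          simp [PySem.Str.slice, PySem.Chars.slice_eq_listSlice, PySem.List.slice_natCast]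
        rw [h4, h5]
        simp
    · have hs' : PySem.Chars.isspace c = false := by simpa using hs
      match o with
      | none =>
        have hstep : pvBStep text (spans, Option.map (fun (s : Nat) => (s : Int)) none) ((k : Int), c)
            = (spans, Option.map (fun (s : Nat) => (s : Int)) (some k)) := by
          simp [pvBStep, show PySem.Str.isspace = PySem.Chars.isspace from rfl, hs']
        rw [hstep, ih (k + 1) spans (some k) hpair.2 (by omega)
          (by
            intro t ht
            injection ht with ht
            subst ht
            refine ⟨by omega, hklt, ?_⟩
            intro d hd
            have : (k + 1 - k) = 1 := by omega
            rw [this, ← hrest] at hd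
            simp at hd
            subst hd
            exact hs')]
        simp only [pvBRhs]
        rw [← hrest]
      | some s =>
        obtain ⟨hsk, hslen, hwin⟩ := hinv s rfl
        have hstep : pvBStep text (spans, Option.map (fun (s : Nat) => (s : Int)) (some s)) ((k : Int), c)
            = (spans, Option.map (fun (s : Nat) => (s : Int)) (some s)) := by
          simp [pvBStep, show PySem.Str.isspace = PySem.Chars.isspace from rfl, hs']
        rw [hstep, ih (k + 1) spans (some s) hpair.2 (by omega)
          (by
            intro t ht
            injection ht with ht
            subst ht
            refine ⟨by omega, hslen, ?_⟩
            intro d hd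
            have h6 : k + 1 - s = (k - s) + 1 := by omega
            rw [h6, List.take_add_one] at hd
            rcases List.mem_append.1 hd with hd | hd
            · exact hwin d hd
            · have h7 : (text.toList.drop s)[k - s]? = some c := by
                rw [List.getElem?_drop, Nat.add_sub_cancel' (by omega : s ≤ k),
                  List.getElem?_eq_getElem hklt, hck]
              rw [h7] at hd
              simp at hd
              subst hd
              exact hs')]
        simp only [pvBRhs]

theorem pvA_eq_pvSpans (text : String) : token_spans_py text = pvSpans text.toList 0 := by
  have h := pvA_inv text text.toList.length text.toList (le_refl _) 0 0 []
    (by simp) (by simp) (le_refl 0) (by intro j hj h1 h2; omega)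
  simpa [token_spans_py, PySem.Str.split₀] using h

theorem pvB_eq_pvSpans (text : String) : token_spans_py_alt text = pvSpans text.toList 0 := by
  have h := pvB_inv text text.toList 0 [] none (by simp) (by simp)
    (by intro s hs; cases hs)
  simpa [token_spans_py_alt, pvBRhs] using h

-- ===== VERDICT (by name: the statement is the Claim_ definition above) =====
theorem token_spans_py_spec : Claim_equal_token_spans_py := by
  intro text _
  unfold Spec_token_spans_py
  rw [pvA_eq_pvSpans, pvB_eq_pvSpans]
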